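-- pv_equiv track=rewrite | github.com/augutso1/Hallucinator | src/main.py | analyze_inconsistency_type
-- ===== SOURCE A (Python) =====
-- from typing import List, Dict, Tuple
--
-- def analyze_inconsistency_type(sentence: str, samples: List[str]) -> Dict:
--     """
--     Analyze what type of inconsistency we're seeing.
--
--     Inconsistency Classification System:
--     1. likely_consistent: High agreement across models
--     2. expression_variation: Same facts, different wording
--     3. direct_contradiction: Explicit disagreement
--     4. unique_information: Info only in main response
--     5. mixed_signals: Unclear pattern requiring manual review
--
--     This classification helps users understand the nature of potential
--     hallucinations and prioritize manual fact-checking efforts.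
--     """
--     analysis = {
--         "sentence": sentence,
--         "inconsistency_type": "unknown",
--         "explanation": "",
--         "confidence": "low"
--     }
--
--     exact_matches = 0
--     partial_matches = 0
--     contradictions = 0
--
--     sentence_lower = sentence.lower()
--     sentence_words = set(sentence_lower.split())
--
--     # Analyze each sample for different types of consistency/inconsistency
--     for sample in samples:
--         sample_lower = sample.lower()
--
--         # Exact match: sentence appears verbatim in sample
--         if sentence_lower in sample_lower:
--             exact_matches += 1
--
--         # Partial match: significant word overlap (>50% of sentence words)
--         sample_words = set(sample_lower.split())
--         overlap = len(sentence_words.intersection(sample_words))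
--         if overlap > len(sentence_words) * 0.5:
--             partial_matches += 1
--
--         # Direct contradiction: explicit negation patterns
--         contradiction_patterns = [
--             ("is", "is not"), ("was", "was not"), ("can", "cannot"),
--             ("will", "will not"), ("has", "has not"), ("true", "false")
--         ]
--
--         for pos, neg in contradiction_patterns:
--             if (pos in sentence_lower and neg in sample_lower) or \
--                (neg in sentence_lower and pos in sample_lower):
--                 contradictions += 1
--                 break
--
--     total_samples = len(samples)
--
--     # Classification logic with empirically determined thresholds
--     if exact_matches >= total_samples * 0.8:
--         analysis["inconsistency_type"] = "likely_consistent"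
--         analysis["explanation"] = "Sentence appears consistently across most samples"
--         analysis["confidence"] = "high"
--     elif partial_matches >= total_samples * 0.6:
--         analysis["inconsistency_type"] = "expression_variation"
--         analysis["explanation"] = "Same information expressed differently across models"
--         analysis["confidence"] = "medium"
--     elif contradictions > 0:
--         analysis["inconsistency_type"] = "direct_contradiction"
--         analysis["explanation"] = "Models directly contradict each other on this point"
--         analysis["confidence"] = "high"
--     elif partial_matches == 0 and exact_matches == 0:
--         analysis["inconsistency_type"] = "unique_information"
--         analysis["explanation"] = "Information appears only in main response, not in other samples"
--         analysis["confidence"] = "medium"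
--     else:
--         analysis["inconsistency_type"] = "mixed_signals"
--         analysis["explanation"] = "Unclear pattern - requires manual review"
--         analysis["confidence"] = "low"
--
--     return analysis
-- ===== SOURCE B (Python) =====
-- def _at_least(hits, need):
--     """True iff at least `need` of the boolean iterator's items are True (early exit)."""
--     if need <= 0:
--         return True
--     for hit in hits:
--         if hit:
--             need -= 1
--             if need == 0:
--                 return True
--     return False
--
--
-- def analyze_inconsistency_type(sentence, samples):
--     sl = sentence.lower()
--     words = set(sl.split())
--     n = len(samples)
--     pats = [("is", "is not"), ("was", "was not"), ("can", "cannot"),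
--             ("will", "will not"), ("has", "has not"), ("true", "false")]
--
--     def is_exact(s):
--         return sl in s.lower()
--
--     def is_partial(s):
--         return 2 * len(words & set(s.lower().split())) > len(words)
--
--     def is_contra(s):
--         low = s.lower()
--         return any((p in sl and q in low) or (q in sl and p in low) for p, q in pats)
--
--     # Decision procedure: each cascade condition is decided directly by a
--     # short-circuiting threshold/existence test; no counts are materialised.
--     # exact >= n*0.8 <=> exact >= ceil(4n/5); partial >= n*0.6 <=> partial >= ceil(3n/5)
--     if _at_least(map(is_exact, samples), -(-4 * n // 5)):
--         t, e, c = ("likely_consistent",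
--                    "Sentence appears consistently across most samples", "high")
--     elif _at_least(map(is_partial, samples), -(-3 * n // 5)):
--         t, e, c = ("expression_variation",
--                    "Same information expressed differently across models", "medium")
--     elif any(map(is_contra, samples)):
--         t, e, c = ("direct_contradiction",
--                    "Models directly contradict each other on this point", "high")
--     elif not any(map(is_partial, samples)) and not any(map(is_exact, samples)):
--         t, e, c = ("unique_information",
--                    "Information appears only in main response, not in other samples", "medium")
--     else:
--         t, e, c = ("mixed_signals", "Unclear pattern - requires manual review", "low")
--
--     return {"sentence": sentence, "inconsistency_type": t,
--             "explanation": e, "confidence": c}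
-- ===== Notes on version B (the rewrite author's own statement) =====
-- stated objective: alternative
-- what changed: A's exhaustive loop that materialises three counters and then compares them to thresholds is replaced by a direct decision procedure: each cascade condition is decided on its own by a short-circuiting 'at least ceil(4n/5) / ceil(3n/5) matches' scan or an any()/existence test over lazily mapped predicates, so no counts are ever computed.
import Mathlib
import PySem

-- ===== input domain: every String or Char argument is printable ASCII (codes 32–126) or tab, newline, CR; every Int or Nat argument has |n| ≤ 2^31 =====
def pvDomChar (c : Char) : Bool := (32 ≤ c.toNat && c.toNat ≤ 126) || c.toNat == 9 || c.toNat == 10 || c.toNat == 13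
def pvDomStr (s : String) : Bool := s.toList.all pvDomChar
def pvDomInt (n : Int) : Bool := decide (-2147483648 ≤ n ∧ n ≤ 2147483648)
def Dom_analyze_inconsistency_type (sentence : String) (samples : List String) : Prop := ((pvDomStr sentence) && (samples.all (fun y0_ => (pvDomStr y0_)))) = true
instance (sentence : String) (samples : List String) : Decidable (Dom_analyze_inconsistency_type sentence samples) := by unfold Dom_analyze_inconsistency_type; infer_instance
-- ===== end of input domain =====

-- B replaces A's exhaustive three-counter loop by a short-circuiting decision procedure:
-- each cascade condition is decided directly by an early-exit 'at least k matches' scan or an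
-- existence test, with no counters materialised (objective: alternative, same worst-case cost).


-- ===== PORT A =====
def pvPatterns : List (String × String) :=
  [("is", "is not"), ("was", "was not"), ("can", "cannot"),
   ("will", "will not"), ("has", "has not"), ("true", "false")]

-- A's per-sample loop body, maintaining (exact_matches, partial_matches, contradictions).
-- 'overlap > len(sentence_words) * 0.5' is ported as '2*overlap > len' — exact, since 0.5 is an
-- exact binary float; the inner 'for pos, neg … break' increments once iff some pattern matches,
-- which is List.any.
def pvStepA (sentence_lower : String) (sentence_words : PySem.Set String)
    (acc : Int × Int × Int) (sample : String) : Int × Int × Int :=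
  let sample_lower := PySem.Str.lower sample
  let acc1 := if PySem.Str.isIn sentence_lower sample_lower then (acc.1 + 1, acc.2.1, acc.2.2) else acc
  let sample_words : PySem.Set String := PySem.Set.ofList (PySem.Str.split₀ sample_lower)
  let overlap := PySem.Set.len (PySem.Set.inter sentence_words sample_words)
  let acc2 := if 2 * overlap > PySem.Set.len sentence_words then (acc1.1, acc1.2.1 + 1, acc1.2.2) else acc1
  let acc3 := if pvPatterns.any (fun pn =>
        (PySem.Str.isIn pn.1 sentence_lower && PySem.Str.isIn pn.2 sample_lower) ||
        (PySem.Str.isIn pn.2 sentence_lower && PySem.Str.isIn pn.1 sample_lower))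
      then (acc2.1, acc2.2.1, acc2.2.2 + 1) else acc2
  acc3

-- 'exact_matches >= total*0.8' / 'partial_matches >= total*0.6' are ported as '5*x ≥ 4*total' /
-- '5*x ≥ 3*total' — exact for 0 ≤ total ≤ 2^31: the float rounding error of total*0.8 / total*0.6
-- stays below half an ulp of the nearest integer (checked against CPython).
def analyze_inconsistency_type (sentence : String) (samples : List String) : List (String × String) :=
  let analysis : PySem.Dict String String :=
    PySem.Dict.ofList [("sentence", sentence), ("inconsistency_type", "unknown"), ("explanation", ""), ("confidence", "low")]
  let sentence_lower := PySem.Str.lower sentence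
  let sentence_words : PySem.Set String := PySem.Set.ofList (PySem.Str.split₀ sentence_lower)
  let counts := samples.foldl (pvStepA sentence_lower sentence_words) (0, 0, 0)
  let exact_matches := counts.1
  let partial_matches := counts.2.1
  let contradictions := counts.2.2
  let total : Int := samples.length
  if 5 * exact_matches ≥ 4 * total then
    (((analysis.insert "inconsistency_type" "likely_consistent").insert "explanation"
      "Sentence appears consistently across most samples").insert "confidence" "high").items
  else if 5 * partial_matches ≥ 3 * total then
    (((analysis.insert "inconsistency_type" "expression_variation").insert "explanation"
      "Same information expressed differently across models").insert "confidence" "medium").items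
  else if contradictions > 0 then
    (((analysis.insert "inconsistency_type" "direct_contradiction").insert "explanation"
      "Models directly contradict each other on this point").insert "confidence" "high").items
  else if partial_matches = 0 ∧ exact_matches = 0 then
    (((analysis.insert "inconsistency_type" "unique_information").insert "explanation"
      "Information appears only in main response, not in other samples").insert "confidence" "medium").items
  else
    (((analysis.insert "inconsistency_type" "mixed_signals").insert "explanation"
      "Unclear pattern - requires manual review").insert "confidence" "low").items

-- ===== PORT B =====
-- Source B's _at_least: early exit as soon as `need` hits are seen
def pvAtLeast (pred : String → Bool) (need : Int) (l : List String) : Bool :=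
  if need ≤ 0 then true
  else match l with
    | [] => false
    | s :: rest => pvAtLeast pred (if pred s then need - 1 else need) rest

-- B's thresholds: ceil(4n/5) = -(-4*n//5), ceil(3n/5) = -(-3*n//5), as in Source B
def analyze_inconsistency_type_alt (sentence : String) (samples : List String) : List (String × String) :=
  let sl := PySem.Str.lower sentence
  let words : PySem.Set String := PySem.Set.ofList (PySem.Str.split₀ sl)
  let n : Int := samples.length
  let is_exact : String → Bool := fun s => PySem.Str.isIn sl (PySem.Str.lower s)
  let is_partial : String → Bool := fun s =>
    2 * PySem.Set.len (PySem.Set.inter words (PySem.Set.ofList (PySem.Str.split₀ (PySem.Str.lower s)))) >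
      PySem.Set.len words
  let is_contra : String → Bool := fun s =>
    let low := PySem.Str.lower s
    pvPatterns.any (fun pn =>
      (PySem.Str.isIn pn.1 sl && PySem.Str.isIn pn.2 low) ||
      (PySem.Str.isIn pn.2 sl && PySem.Str.isIn pn.1 low))
  let tec : String × String × String :=
    if pvAtLeast is_exact (-(PySem.Int.floordiv (-(4 * n)) 5)) samples then
      ("likely_consistent", "Sentence appears consistently across most samples", "high")
    else if pvAtLeast is_partial (-(PySem.Int.floordiv (-(3 * n)) 5)) samples then
      ("expression_variation", "Same information expressed differently across models", "medium")
    else if samples.any is_contra then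
      ("direct_contradiction", "Models directly contradict each other on this point", "high")
    else if !(samples.any is_partial) && !(samples.any is_exact) then
      ("unique_information", "Information appears only in main response, not in other samples", "medium")
    else
      ("mixed_signals", "Unclear pattern - requires manual review", "low")
  [("sentence", sentence), ("inconsistency_type", tec.1), ("explanation", tec.2.1), ("confidence", tec.2.2)]

-- ===== PRECONDITION & SPEC =====
def Spec_analyze_inconsistency_type (sentence : String) (samples : List String) (out : List (String × String)) : Prop := out = analyze_inconsistency_type_alt sentence samples
instance (sentence : String) (samples : List String) (out : List (String × String)) : Decidable (Spec_analyze_inconsistency_type sentence samples out) := by unfold Spec_analyze_inconsistency_type; infer_instance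

-- ===== CLAIM (what is proved, stated in full; the proofs are below) =====
def Claim_equal_analyze_inconsistency_type : Prop := ∀ (sentence : String) (samples : List String), Dom_analyze_inconsistency_type sentence samples → Spec_analyze_inconsistency_type sentence samples (analyze_inconsistency_type sentence samples)

-- ===== LEMMAS AND PROOFS =====

-- A's fused fold is the triple of the three match counts.
theorem pvFoldA_eq_counts (sl : String) (sw : PySem.Set String) (l : List String)
    (e p c : Int) :
    l.foldl (pvStepA sl sw) (e, p, c) =
      (e + (l.countP (fun s => PySem.Str.isIn sl (PySem.Str.lower s)) : Int),
       p + (l.countP (fun s => decide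
         (2 * PySem.Set.len (PySem.Set.inter sw (PySem.Set.ofList (PySem.Str.split₀ (PySem.Str.lower s)))) >
           PySem.Set.len sw)) : Int),
       c + (l.countP (fun s => pvPatterns.any (fun pn =>
         (PySem.Str.isIn pn.1 sl && PySem.Str.isIn pn.2 (PySem.Str.lower s)) ||
         (PySem.Str.isIn pn.2 sl && PySem.Str.isIn pn.1 (PySem.Str.lower s)))) : Int)) := by
  induction l generalizing e p c with
  | nil => simp
  | cons hd tl ih =>
    have hstep : pvStepA sl sw (e, p, c) hd =
        (e + (if PySem.Str.isIn sl (PySem.Str.lower hd) then 1 else 0),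
         p + (if 2 * PySem.Set.len (PySem.Set.inter sw (PySem.Set.ofList (PySem.Str.split₀ (PySem.Str.lower hd)))) >
             PySem.Set.len sw then 1 else 0),
         c + (if pvPatterns.any (fun pn =>
           (PySem.Str.isIn pn.1 sl && PySem.Str.isIn pn.2 (PySem.Str.lower hd)) ||
           (PySem.Str.isIn pn.2 sl && PySem.Str.isIn pn.1 (PySem.Str.lower hd))) then 1 else 0)) := by
      simp only [pvStepA]
      split_ifs <;> (first | rfl | (refine Prod.ext ?_ (Prod.ext ?_ ?_) <;> simp))
    rw [List.foldl_cons, hstep, ih]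
    simp only [List.countP_cons, decide_eq_true_eq]
    refine Prod.ext ?_ (Prod.ext ?_ ?_) <;>
      simp only [] <;> split_ifs <;> push_cast <;> ring

-- B's early-exit scan decides 'the count reaches the threshold'.
theorem pvAtLeast_eq_countP (pred : String → Bool) (need : Int) (l : List String) :
    pvAtLeast pred need l = decide (need ≤ (l.countP pred : Int)) := by
  induction l generalizing need with
  | nil =>
    unfold pvAtLeast
    by_cases h : need ≤ 0 <;> simp [h]
  | cons hd tl ih =>
    unfold pvAtLeast
    by_cases h : need ≤ 0
    · rw [if_pos h]
      have hc : (0 : Int) ≤ ((hd :: tl).countP pred : Int) := Int.natCast_nonneg _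
      symm
      rw [decide_eq_true_iff]
      omega
    · rw [if_neg h]
      have hm : (match hd :: tl with
          | [] => false
          | s :: rest => pvAtLeast pred (if pred s = true then need - 1 else need) rest) =
          pvAtLeast pred (if pred hd = true then need - 1 else need) tl := rfl
      rw [hm, ih, decide_eq_decide, List.countP_cons]
      by_cases hp : pred hd <;> simp [hp]

-- existence = positive count
theorem pvAny_eq_countP (pred : String → Bool) (l : List String) :
    l.any pred = decide (0 < (l.countP pred : Int)) := by
  induction l with
  | nil => simp
  | cons hd tl ih =>
    by_cases hp : pred hd <;> simp [hp, ih]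

-- ceiling-division threshold vs A's integer inequality
theorem pvCeil_le (k n e : Int) :
    (-(PySem.Int.floordiv (-(k * n)) 5) ≤ e) ↔ (k * n ≤ 5 * e) := by
  rw [PySem.Int.floordiv_eq_ediv_of_pos (by omega : (0:Int) < 5)]
  omega

-- ===== VERDICT (by name: the statement is the Claim_ definition above) =====
set_option maxHeartbeats 1000000 in
theorem analyze_inconsistency_type_spec : Claim_equal_analyze_inconsistency_type := by
  intro sentence samples _
  unfold Spec_analyze_inconsistency_type
  simp only [analyze_inconsistency_type, analyze_inconsistency_type_alt]
  rw [pvFoldA_eq_counts]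
  simp only [pvAtLeast_eq_countP, pvAny_eq_countP, zero_add]
  have d4 : decide (-(PySem.Int.floordiv (-(4 * (samples.length : Int))) 5) ≤
        ((samples.countP (fun s => PySem.Str.isIn (PySem.Str.lower sentence) (PySem.Str.lower s))) : Int)) =
      decide (4 * (samples.length : Int) ≤
        5 * ((samples.countP (fun s => PySem.Str.isIn (PySem.Str.lower sentence) (PySem.Str.lower s))) : Int)) := by
    rw [decide_eq_decide]
    exact pvCeil_le 4 samples.length _
  have d3 : decide (-(PySem.Int.floordiv (-(3 * (samples.length : Int))) 5) ≤
        ((samples.countP (fun s => decide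
          (2 * PySem.Set.len (PySem.Set.inter (PySem.Set.ofList (PySem.Str.split₀ (PySem.Str.lower sentence)))
              (PySem.Set.ofList (PySem.Str.split₀ (PySem.Str.lower s)))) >
            PySem.Set.len (PySem.Set.ofList (PySem.Str.split₀ (PySem.Str.lower sentence)))))) : Int)) =
      decide (3 * (samples.length : Int) ≤
        5 * ((samples.countP (fun s => decide
          (2 * PySem.Set.len (PySem.Set.inter (PySem.Set.ofList (PySem.Str.split₀ (PySem.Str.lower sentence)))
              (PySem.Set.ofList (PySem.Str.split₀ (PySem.Str.lower s)))) >
            PySem.Set.len (PySem.Set.ofList (PySem.Str.split₀ (PySem.Str.lower sentence)))))) : Int)) := by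
    rw [decide_eq_decide]
    exact pvCeil_le 3 samples.length _
  rw [d4, d3]
  simp only [decide_eq_true_iff, Bool.and_eq_true, Bool.not_eq_true', decide_eq_false_iff_not, not_lt, ge_iff_le]
  split_ifs <;> first | rfl | omega
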